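-- pv_equiv track=rewrite | github.com/mantianwuming/work_test | work/tengxun_test1.py | deleteZeroOne
-- ===== SOURCE A (Python) =====
-- def deleteZeroOne(s):
--     i = 0
--     while i < len(s)-1 and len(s) >= 2:
--
--         if s[i] == '1' and s[i+1] == '0':
--             s = s[:i] + s[i+2:]
--         else:
--             i += 1
--     return s
-- ===== SOURCE B (Python) =====
-- def deleteZeroOne(s):
--     # One forward pass with a one-char buffer mirroring the no-backtrack rule: O(n).
--     out = []
--     cur = None
--     for c in s:
--         if cur is None:
--             cur = c
--         elif cur == '1' and c == '0':
--             cur = None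
--         else:
--             out.append(cur)
--             cur = c
--     if cur is not None:
--         out.append(cur)
--     return ''.join(out)
-- ===== Notes on version B (the rewrite author's own statement) =====
-- stated objective: faster
-- what changed: Replaced A's while-loop that rebuilds the string by slicing on every '10' hit (quadratic rescans/copies) with a single forward pass keeping a committed output list and a one-char buffer that mirrors the no-backtrack consumption rule.
import Mathlib
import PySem

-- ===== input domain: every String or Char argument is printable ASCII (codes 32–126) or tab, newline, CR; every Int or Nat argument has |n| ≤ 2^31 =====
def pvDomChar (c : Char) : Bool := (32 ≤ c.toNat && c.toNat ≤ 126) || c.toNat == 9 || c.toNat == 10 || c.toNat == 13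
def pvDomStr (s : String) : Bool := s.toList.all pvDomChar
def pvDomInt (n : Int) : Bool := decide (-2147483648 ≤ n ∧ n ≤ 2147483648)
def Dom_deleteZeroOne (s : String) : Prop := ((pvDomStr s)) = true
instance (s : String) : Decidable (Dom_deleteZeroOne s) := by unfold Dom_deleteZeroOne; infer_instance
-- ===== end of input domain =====

-- B replaces A's quadratic rescan-and-rebuild while-loop by one forward pass with a
-- one-char buffer (objective: faster, asymptotic).

-- ===== PORT A =====
-- A's while loop: i only ever increases from 0, so it is a Nat; the guard
-- 'i < len(s)-1 and len(s) >= 2' equals 'i + 1 < s.length' over Nat (both false for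
-- len ≤ 1, where Python's len(s)-1 is ≤ 0). Slices s[:i], s[i+2:] with i ≥ 0 are
-- exactly take/drop. Each iteration decreases s.length - i.
def deleteZeroOneLoop (s : List Char) (i : Nat) : List Char :=
  if h : i + 1 < s.length then
    if s.getD i ' ' = '1' ∧ s.getD (i+1) ' ' = '0' then
      deleteZeroOneLoop (s.take i ++ s.drop (i+2)) i
    else
      deleteZeroOneLoop s (i+1)
  else s
termination_by s.length - i
decreasing_by
  · simp only [List.length_append, List.length_take, List.length_drop]
    omega
  · omega

def deleteZeroOne (s : String) : String := String.mk (deleteZeroOneLoop s.toList 0)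

-- ===== PORT B =====
-- Source B's for-loop over the characters with state (out, cur), then the final append.
def deleteZeroOneAltLoop (cur : Option Char) (out : List Char) : List Char → List Char
  | [] =>
      match cur with
      | some c => out ++ [c]
      | none => out
  | c :: rest =>
      match cur with
      | none => deleteZeroOneAltLoop (some c) out rest
      | some p =>
          if p = '1' ∧ c = '0' then deleteZeroOneAltLoop none out rest
          else deleteZeroOneAltLoop (some c) (out ++ [p]) rest

def deleteZeroOne_alt (s : String) : String :=
  String.mk (deleteZeroOneAltLoop none [] s.toList)

-- ===== PRECONDITION & SPEC =====
def Spec_deleteZeroOne (s : String) (out : String) : Prop := out = deleteZeroOne_alt s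
instance (s : String) (out : String) : Decidable (Spec_deleteZeroOne s out) := by unfold Spec_deleteZeroOne; infer_instance

-- ===== CLAIM (what is proved, stated in full; the proofs are below) =====
def Claim_equal_deleteZeroOne : Prop := ∀ (s : String), Dom_deleteZeroOne s → Spec_deleteZeroOne s (deleteZeroOne s)

-- ===== LEMMAS AND PROOFS =====

-- Invariant: A's state (s = out ++ rest, i = out.length) matches B's state
-- (committed prefix out, remaining input rest, empty buffer).
theorem loop_agree (rest out : List Char) :
    deleteZeroOneLoop (out ++ rest) out.length = deleteZeroOneAltLoop none out rest := by
  have ih : ∀ r : List Char, r.length < rest.length → ∀ o : List Char,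
      deleteZeroOneLoop (o ++ r) o.length = deleteZeroOneAltLoop none o r :=
    fun r _ o => loop_agree r o
  match rest with
    | [] =>
      rw [deleteZeroOneLoop]
      simp [deleteZeroOneAltLoop]
    | [c] =>
      rw [deleteZeroOneLoop]
      simp [deleteZeroOneAltLoop]
    | c1 :: c2 :: rest' =>
      rw [deleteZeroOneLoop]
      have hlen : out.length + 1 < (out ++ c1 :: c2 :: rest').length := by
        simp
      have h1 : (out ++ c1 :: c2 :: rest').getD out.length ' ' = c1 := by
        simp [List.getD_eq_getElem?_getD]
      have h2 : (out ++ c1 :: c2 :: rest').getD (out.length + 1) ' ' = c2 := by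
        have : out.length + 1 = (out ++ [c1]).length := by simp
        rw [List.getD_eq_getElem?_getD, show out ++ c1 :: c2 :: rest' = (out ++ [c1]) ++ c2 :: rest' by simp, this]
        simp
      rw [dif_pos hlen, h1, h2]
      by_cases h10 : c1 = '1' ∧ c2 = '0'
      · rw [if_pos h10]
        have hs : (out ++ c1 :: c2 :: rest').take out.length ++ (out ++ c1 :: c2 :: rest').drop (out.length + 2) = out ++ rest' := by
          simp [List.drop_append]
        rw [hs, ih rest' (by simp) out]
        simp [deleteZeroOneAltLoop, h10.1, h10.2]
      · rw [if_neg h10]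
        have hre : out ++ c1 :: c2 :: rest' = (out ++ [c1]) ++ c2 :: rest' := by simp
        have hl : out.length + 1 = (out ++ [c1]).length := by simp
        rw [hre, hl, ih (c2 :: rest') (by simp) (out ++ [c1])]
        simp only [deleteZeroOneAltLoop]
        split
        · next hp => exact absurd hp h10
        · rfl
termination_by rest.length

-- ===== VERDICT (by name: the statement is the Claim_ definition above) =====
theorem deleteZeroOne_spec : Claim_equal_deleteZeroOne := by
  intro s _
  unfold Spec_deleteZeroOne deleteZeroOne deleteZeroOne_alt
  have := loop_agree s.toList []
  simpa using congrArg String.mk this
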